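-- pv_equiv track=rewrite | github.com/kat0h/mariage | mariage.py | image2tenji
-- ===== SOURCE A (Python) =====
-- def num2tenjicode(num: int):
--     flags = 0
--     flags += (num & 0b00001000) << 3
--     flags += (num & 0b01110000) >> 1
--     flags += (num & 0b10000111)
--     return chr(flags + 0x2800)
--
-- def image2tenji(image: list):
--     # リストのサイズを調節
--     # (x, y)
--     size = [len(image), len(image[0])]
--     size2 = [
--         (size[0] // 4 + size[0] % 4) * 4,
--         (size[1] // 2 + size[1] % 2) * 2,
--     ]
--     image2 = [[0] * size2[1] for i in range(size2[0])]
--     for i in range(size[0]):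
--         for j in range(size[1]):
--             image2[i][j] = image[i][j]
--     # 点字化
--     ret = ""
--     for i in range(0, size2[0], 4):
--         for j in range(0, size2[1], 2):
--             code = 0
--             code += image2[i][j] * 1
--             code += image2[i+1][j] * 2
--             code += image2[i+2][j] * 4
--             code += image2[i+3][j] * 8
--             code += image2[i][j+1] * 16
--             code += image2[i+1][j+1] * 32
--             code += image2[i+2][j+1] * 64
--             code += image2[i+3][j+1] * 128
--             ret += num2tenjicode(code)
--         ret += "\n"
--     return ret[0:-1]
-- ===== SOURCE B (Python) =====
-- def _braille(code: int):
--     return chr(((code & 0b00001000) << 3)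
--                + ((code & 0b01110000) >> 1)
--                + (code & 0b10000111)
--                + 0x2800)
--
-- def image2tenji(image: list):
--     rows, cols = len(image), len(image[0])
--     nr = rows // 4 + rows % 4
--     nc = cols // 2 + cols % 2
--     # scatter pass: each pixel adds its weighted value into its block's code
--     codes = [0] * (nr * nc)
--     for i in range(rows):
--         for j in range(cols):
--             codes[(i // 4) * nc + j // 2] += image[i][j] * (1 << ((j % 2) * 4 + i % 4))
--     # render pass: one line per block row
--     lines = []
--     for bi in range(nr):
--         lines.append(''.join(map(_braille, codes[bi * nc:(bi + 1) * nc])))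
--     return '\n'.join(lines)
-- ===== Notes on version B (the rewrite author's own statement) =====
-- stated objective: alternative
-- what changed: B replaces A's padded-matrix copy followed by an 8-pixel gather per 4x2 block with a scatter-accumulate algorithm: one pass over the source pixels adds each pixel's weighted value into a flat per-block code accumulator indexed by (i//4)*C+j//2, and a second pass renders the accumulator row-slices into braille lines joined by newlines.
import Mathlib
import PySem

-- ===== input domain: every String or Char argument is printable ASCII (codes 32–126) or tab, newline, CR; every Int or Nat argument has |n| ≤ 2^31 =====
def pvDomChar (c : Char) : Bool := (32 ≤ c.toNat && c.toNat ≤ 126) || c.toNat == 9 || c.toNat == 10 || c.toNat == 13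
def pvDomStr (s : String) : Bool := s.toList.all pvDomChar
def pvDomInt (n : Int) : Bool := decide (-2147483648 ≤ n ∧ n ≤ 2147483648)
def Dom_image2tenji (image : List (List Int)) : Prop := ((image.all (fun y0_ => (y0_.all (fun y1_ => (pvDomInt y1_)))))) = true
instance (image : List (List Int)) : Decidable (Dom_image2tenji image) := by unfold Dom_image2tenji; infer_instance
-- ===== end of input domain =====

-- B replaces A's padded-matrix copy + per-block 8-pixel gather by a scatter-accumulate: one pass over
-- the source pixels adds each weighted pixel into a flat per-block code array, then a render pass maps
-- the array's row slices to braille lines (objective: alternative); equivalence proved on non-empty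
-- images whose rows are all at least as long as the first row (elsewhere Python A raises IndexError).

-- ===== PORT A =====
-- plain double indexing m[i][j] (both Pythons use it; in range on every admitted input)
def pvRead (m : List (List Int)) (i j : Int) : Int :=
  (PySem.List.pyGet? ((PySem.List.pyGet? m i).getD []) j).getD 0

-- m[i][j] = v (indices nonnegative and in range on every admitted input)
def pvWrite (m : List (List Int)) (i j : Int) (v : Int) : List (List Int) :=
  m.set i.toNat (((PySem.List.pyGet? m i).getD []).set j.toNat v)

def num2tenjicode (num : Int) : Char :=
  let flags : Int := 0
  let flags := flags + (PySem.Int.band num 8 <<< 3)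
  let flags := flags + (PySem.Int.band num 112 >>> 1)
  let flags := flags + PySem.Int.band num 135
  Char.ofNat (flags + 0x2800).toNat

def image2tenji (image : List (List Int)) : String :=
  let size0 : Int := image.length
  let size1 : Int := ((PySem.List.pyGet? image 0).getD []).length
  let size20 : Int := (PySem.Int.floordiv size0 4 + PySem.Int.mod size0 4) * 4
  let size21 : Int := (PySem.Int.floordiv size1 2 + PySem.Int.mod size1 2) * 2
  let image2 : List (List Int) := List.replicate size20.toNat (List.replicate size21.toNat 0)
  let image2 := (PySem.List.pyRange 0 size0 1).foldl (fun m i =>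
      (PySem.List.pyRange 0 size1 1).foldl (fun m j => pvWrite m i j (pvRead image i j)) m) image2
  let ret : List Char := (PySem.List.pyRange 0 size20 4).foldl (fun ret i =>
      ((PySem.List.pyRange 0 size21 2).foldl (fun ret j =>
        let code : Int := 0
        let code := code + pvRead image2 i j * 1
        let code := code + pvRead image2 (i+1) j * 2
        let code := code + pvRead image2 (i+2) j * 4
        let code := code + pvRead image2 (i+3) j * 8
        let code := code + pvRead image2 i (j+1) * 16
        let code := code + pvRead image2 (i+1) (j+1) * 32
        let code := code + pvRead image2 (i+2) (j+1) * 64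
        let code := code + pvRead image2 (i+3) (j+1) * 128
        ret ++ [num2tenjicode code]) ret) ++ ['\n']) []
  String.ofList (PySem.List.slice ret none (some (-1)))

-- ===== PORT B =====
def pvBraille (code : Int) : Char :=
  Char.ofNat ((PySem.Int.band code 8 <<< 3) + (PySem.Int.band code 112 >>> 1)
    + PySem.Int.band code 135 + 0x2800).toNat

def image2tenji_alt (image : List (List Int)) : String :=
  let rows : Int := image.length
  let cols : Int := ((PySem.List.pyGet? image 0).getD []).length
  let nr : Int := PySem.Int.floordiv rows 4 + PySem.Int.mod rows 4
  let nc : Int := PySem.Int.floordiv cols 2 + PySem.Int.mod cols 2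
  let codes : List Int := List.replicate (nr * nc).toNat 0
  let codes := (PySem.List.pyRange 0 rows 1).foldl (fun s i =>
      (PySem.List.pyRange 0 cols 1).foldl (fun s j =>
        let t : Int := PySem.Int.floordiv i 4 * nc + PySem.Int.floordiv j 2
        PySem.List.pySetD s t ((PySem.List.pyGet? s t).getD 0
          + pvRead image i j * ((1 : Int) <<< (PySem.Int.mod j 2 * 4 + PySem.Int.mod i 4).toNat))) s) codes
  let lines : List (List Char) := (PySem.List.pyRange 0 nr 1).map (fun bi =>
      (PySem.List.slice codes (some (bi * nc)) (some ((bi + 1) * nc))).map pvBraille)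
  String.ofList (List.intercalate ['\n'] lines)

-- ===== PRECONDITION & SPEC =====
-- Pre_ excludes exactly the inputs where Python A raises IndexError: the empty image
-- (image[0]) and ragged images having a row shorter than the first row (the copy loop).
def Pre_image2tenji (image : List (List Int)) : Prop :=
  image ≠ [] ∧ ∀ row ∈ image, (image.headD []).length ≤ row.length
instance (image : List (List Int)) : Decidable (Pre_image2tenji image) := by
  unfold Pre_image2tenji; infer_instance

def pvWitness_image2tenji : List (List Int) := [[1, 0], [0, 1], [1, 1], [0, 0]]

def Spec_image2tenji (image : List (List Int)) (out : String) : Prop := out = image2tenji_alt image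
instance (image : List (List Int)) (out : String) : Decidable (Spec_image2tenji image out) := by
  unfold Spec_image2tenji; infer_instance

-- ===== CLAIM (what is proved, stated in full; the proofs are below) =====
def Claim_equal_image2tenji : Prop := ∀ (image : List (List Int)), Dom_image2tenji image → Pre_image2tenji image → Spec_image2tenji image (image2tenji image)

-- ===== LEMMAS AND PROOFS =====

theorem pvFoldSet_length {α : Type} (d : α) (F : Nat → α → α) (l : List Nat) (s : List α) :
    (l.foldl (fun s i => s.set i (F i (s.getD i d))) s).length = s.length := by
  induction l generalizing s with
  | nil => rfl
  | cons i t ih => rw [List.foldl_cons, ih, List.length_set]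

theorem pvFoldSet_getD {α : Type} (d : α) (F : Nat → α → α) (n t : Nat) (s : List α) :
    ((List.range n).foldl (fun s i => s.set i (F i (s.getD i d))) s).getD t d
      = if t < n ∧ t < s.length then F t (s.getD t d) else s.getD t d := by
  induction n with
  | zero => simp
  | succ n ih =>
    rw [List.range_succ, List.foldl_append]
    simp only [List.foldl_cons, List.foldl_nil]
    have hlen := pvFoldSet_length d F (List.range n) s
    rw [List.getD_eq_getElem?_getD, List.getElem?_set]
    by_cases htn : n = t
    · subst htn
      by_cases hl : n < s.length
      · rw [if_pos rfl, if_pos (by omega : n < (List.foldl (fun s i => s.set i (F i (s.getD i d))) s (List.range n)).length)]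
        rw [Option.getD_some, ih, if_neg (by omega), if_pos ⟨by omega, hl⟩]
      · rw [if_pos rfl, if_neg (by omega : ¬ n < (List.foldl (fun s i => s.set i (F i (s.getD i d))) s (List.range n)).length)]
        rw [Option.getD_none, if_neg (by omega)]
        rw [List.getD_eq_getElem?_getD, List.getElem?_eq_none (by omega)]
        rfl
    · rw [if_neg htn, ← List.getD_eq_getElem?_getD, ih]
      by_cases h1 : t < n ∧ t < s.length
      · rw [if_pos h1, if_pos (by omega)]
      · rw [if_neg h1, if_neg (by omega)]

theorem pvRead_nat (m : List (List Int)) (i j : Nat) :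
    pvRead m (i : Int) (j : Int) = (m.getD i []).getD j 0 := by
  simp [pvRead, PySem.List.pyGet?_natCast, List.getD_eq_getElem?_getD]

theorem pvWrite_nat (m : List (List Int)) (i j : Nat) (v : Int) :
    pvWrite m (i : Int) (j : Int) v = m.set i ((m.getD i []).set j v) := by
  simp [pvWrite, PySem.List.pyGet?_natCast, List.getD_eq_getElem?_getD]

-- collapse the inner copy loop (over Nat indices) to a single row update
theorem pvInner_collapse (v : Nat → Int) (js : List Nat) :
    ∀ (m : List (List Int)) (i : Nat), i < m.length →
    js.foldl (fun m j => m.set i ((m.getD i []).set j (v j))) m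
      = m.set i (js.foldl (fun r j => r.set j (v j)) (m.getD i [])) := by
  induction js with
  | nil =>
    intro m i hi
    rw [List.foldl_nil, List.foldl_nil, List.getD_eq_getElem?_getD,
        List.getElem?_eq_getElem hi, Option.getD_some, List.set_getElem_self]
  | cons j t ih =>
    intro m i hi
    rw [List.foldl_cons, ih _ i (by simpa using hi), List.foldl_cons]
    rw [List.set_set]
    congr 1
    rw [List.getD_eq_getElem?_getD, List.getElem?_set, if_pos rfl, if_pos hi]
    rfl

theorem pvFold_inner_to_set (v : Nat → Nat → Int) (c : Nat) (l : List Nat) :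
    ∀ (m : List (List Int)), (∀ i ∈ l, i < m.length) →
    l.foldl (fun m i => (List.range c).foldl (fun m j => m.set i ((m.getD i []).set j (v i j))) m) m
      = l.foldl (fun m i => m.set i ((List.range c).foldl (fun r j => r.set j (v i j)) (m.getD i []))) m := by
  induction l with
  | nil => intro m _; rfl
  | cons i t ih =>
    intro m h
    rw [List.foldl_cons, pvInner_collapse (v i) (List.range c) m i (h i (by simp)), List.foldl_cons]
    exact ih _ (fun i' hi' => by rw [List.length_set]; exact h i' (by simp [hi']))

theorem pvCopy_entry (image : List (List Int)) (R2 C2 t u : Nat) (ht : t < R2) (hu : u < C2) :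
    (((List.range image.length).foldl
        (fun m i => m.set i ((List.range (image.headD []).length).foldl
           (fun r j => r.set j (pvRead image (i : Int) (j : Int))) (m.getD i [])))
        (List.replicate R2 (List.replicate C2 (0:Int)))).getD t []).getD u 0
      = if t < image.length ∧ u < (image.headD []).length then (image.getD t []).getD u 0 else 0 := by
  rw [pvFoldSet_getD ([] : List Int)
        (fun i r => (List.range (image.headD []).length).foldl (fun r j => r.set j (pvRead image (i : Int) (j : Int))) r)
        image.length t _]
  simp only [List.length_replicate]
  by_cases h1 : t < image.length
  · rw [if_pos ⟨h1, ht⟩]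
    have hrep : (List.replicate R2 (List.replicate C2 (0:Int))).getD t [] = List.replicate C2 (0:Int) := by
      rw [List.getD_eq_getElem?_getD, List.getElem?_replicate, if_pos ht]; rfl
    rw [hrep, pvFoldSet_getD (0 : Int) (fun j _ => pvRead image (t : Int) (j : Int))]
    simp only [List.length_replicate]
    by_cases h2 : u < (image.headD []).length
    · rw [if_pos ⟨h2, hu⟩, if_pos ⟨h1, h2⟩, pvRead_nat]
    · rw [if_neg (by omega), if_neg (by omega)]
      rw [List.getD_eq_getElem?_getD, List.getElem?_replicate, if_pos hu]; rfl
  · rw [if_neg (by omega), if_neg (by omega)]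
    have hrep : (List.replicate R2 (List.replicate C2 (0:Int))).getD t [] = List.replicate C2 (0:Int) := by
      rw [List.getD_eq_getElem?_getD, List.getElem?_replicate, if_pos ht]; rfl
    rw [hrep, List.getD_eq_getElem?_getD, List.getElem?_replicate, if_pos hu]; rfl

theorem pvFloordivMod4 (a : Nat) :
    PySem.Int.floordiv (a:Int) 4 + PySem.Int.mod (a:Int) 4 = ((a/4 + a%4 : Nat) : Int) := by
  simp [PySem.Int.floordiv, PySem.Int.mod, Int.fdiv_eq_ediv, Int.fmod_eq_emod]

theorem pvFloordivMod2 (a : Nat) :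
    PySem.Int.floordiv (a:Int) 2 + PySem.Int.mod (a:Int) 2 = ((a/2 + a%2 : Nat) : Int) := by
  simp [PySem.Int.floordiv, PySem.Int.mod, Int.fdiv_eq_ediv, Int.fmod_eq_emod]

theorem pvRange_step4 (R : Nat) :
    PySem.List.pyRange 0 ((R*4 : Nat) : Int) 4 = (List.range R).map (fun k => ((4*k : Nat) : Int)) := by
  rw [PySem.List.pyRange_of_pos _ _ (by norm_num)]
  have h : (if (0:Int) < ((R*4:Nat):Int) then ((((R*4:Nat):Int) - 0 + 4 - 1)/4).toNat else 0) = R := by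
    split_ifs with h
    · push_cast at h ⊢; omega
    · push_cast at h; omega
  rw [h]
  exact List.map_congr_left (fun k _ => by push_cast; ring)

theorem pvRange_step2 (C : Nat) :
    PySem.List.pyRange 0 ((C*2 : Nat) : Int) 2 = (List.range C).map (fun k => ((2*k : Nat) : Int)) := by
  rw [PySem.List.pyRange_of_pos _ _ (by norm_num)]
  have h : (if (0:Int) < ((C*2:Nat):Int) then ((((C*2:Nat):Int) - 0 + 2 - 1)/2).toNat else 0) = C := by
    split_ifs with h
    · push_cast at h ⊢; omega
    · push_cast at h; omega
  rw [h]
  exact List.map_congr_left (fun k _ => by push_cast; ring)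

theorem pvFlat_concat (c : Char) : ∀ ls : List (List Char), ls ≠ [] →
    ls.flatMap (fun r => r ++ [c]) = List.intercalate [c] ls ++ [c] := by
  intro ls
  induction ls with
  | nil => intro h; exact absurd rfl h
  | cons a t ih =>
    intro _
    cases t with
    | nil => simp [List.intercalate]
    | cons b t' =>
      have hic : List.intercalate [c] (a :: b :: t') = a ++ [c] ++ List.intercalate [c] (b :: t') := by
        simp [List.intercalate, List.intersperse]
      rw [List.flatMap_cons, ih (by simp), hic]
      simp

def pvPad (image : List (List Int)) (i j : Nat) : Int :=
  if i < image.length ∧ j < (image.headD []).length then (image.getD i []).getD j 0 else 0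

theorem pvFoldl_rows {β : Type} (g : β → List Char) (inner : List Char → β → List Char)
    (hinner : ∀ acc i, inner acc i = acc ++ g i) (l : List β) :
    ∀ acc : List Char,
    l.foldl (fun acc i => inner acc i ++ ['\n']) acc = acc ++ l.flatMap (fun i => g i ++ ['\n']) := by
  induction l with
  | nil => intro acc; simp
  | cons a t ih =>
    intro acc
    rw [List.foldl_cons, hinner, ih, List.flatMap_cons]
    simp [List.append_assoc]

def pvBChar (image : List (List Int)) (bi bj : Nat) : Char :=
  num2tenjicode (pvPad image (4*bi) (2*bj) * 1 + pvPad image (4*bi+1) (2*bj) * 2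
    + pvPad image (4*bi+2) (2*bj) * 4 + pvPad image (4*bi+3) (2*bj) * 8
    + pvPad image (4*bi) (2*bj+1) * 16 + pvPad image (4*bi+1) (2*bj+1) * 32
    + pvPad image (4*bi+2) (2*bj+1) * 64 + pvPad image (4*bi+3) (2*bj+1) * 128)

theorem pvGet0 (image : List (List Int)) (hne : image ≠ []) :
    (PySem.List.pyGet? image 0).getD [] = image.headD [] := by
  cases image with
  | nil => exact absurd rfl hne
  | cons a l => simpa using PySem.List.pyGet?_natCast (a :: l) 0

theorem pvFlatMap_singleton {α β : Type} (f : α → β) (l : List α) :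
    l.flatMap (fun x => [f x]) = l.map f := by
  induction l with
  | nil => rfl
  | cons a t ih => simp [List.flatMap_cons, ih]

theorem pvRet_eval (ch : Nat → Nat → Char) (Rn Cn : Nat) :
    (List.range Rn).foldl
        (fun ret bi => (List.range Cn).foldl (fun ret bj => ret ++ [ch bi bj]) ret ++ ['\n']) []
      = (List.range Rn).flatMap (fun bi => (List.range Cn).map (ch bi) ++ ['\n']) := by
  rw [pvFoldl_rows (fun bi => (List.range Cn).map (ch bi))
      (fun acc bi => (List.range Cn).foldl (fun acc bj => acc ++ [ch bi bj]) acc)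
      (fun acc i => by
        show List.foldl (fun acc bj => acc ++ [ch i bj]) acc (List.range Cn)
            = acc ++ List.map (ch i) (List.range Cn)
        rw [PySem.List.foldl_append_eq_flatMap]; congr 1
        exact pvFlatMap_singleton (ch i) (List.range Cn)) (List.range Rn) []]
  rw [List.nil_append]

theorem pvFlat_concat' (c : Char) (row : Nat → List Char) (Rn : Nat) (h : Rn ≠ 0) :
    (List.range Rn).flatMap (fun bi => row bi ++ [c])
      = List.intercalate [c] ((List.range Rn).map row) ++ [c] := by
  have := pvFlat_concat c ((List.range Rn).map row) (by simp [h])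
  simpa [List.flatMap_map, Function.comp] using this

theorem pvA_eval (image : List (List Int)) (hne : image ≠ []) :
    image2tenji image = String.ofList (List.intercalate ['\n']
      ((List.range (image.length/4 + image.length%4)).map (fun bi =>
        (List.range ((image.headD []).length/2 + (image.headD []).length%2)).map
          (pvBChar image bi)))) := by
  have hs20 : (PySem.Int.floordiv (image.length:Int) 4 + PySem.Int.mod (image.length:Int) 4) * 4
      = (((image.length/4 + image.length%4)*4 : Nat) : Int) := by
    rw [pvFloordivMod4]; push_cast; ring
  have hs21 : (PySem.Int.floordiv ((image.headD []).length:Int) 2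
        + PySem.Int.mod ((image.headD []).length:Int) 2) * 2
      = ((((image.headD []).length/2 + (image.headD []).length%2)*2 : Nat) : Int) := by
    rw [pvFloordivMod2]; push_cast; ring
  simp only [image2tenji, pvGet0 image hne]
  rw [hs20, hs21]
  simp only [Int.toNat_natCast, PySem.List.pyRange_one, sub_zero, zero_add, List.foldl_map,
    pvWrite_nat]
  rw [pvFold_inner_to_set (fun i j => pvRead image (i:Int) (j:Int)) (image.headD []).length
      (List.range image.length)
      (List.replicate ((image.length/4 + image.length%4)*4)
        (List.replicate (((image.headD []).length/2 + (image.headD []).length%2)*2) 0))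
      (by intro i hi; rw [List.length_replicate]; rw [List.mem_range] at hi; omega)]
  rw [pvRange_step4, pvRange_step2]
  simp only [List.foldl_map]
  rw [pvRet_eval]
  rw [pvFlat_concat' '\n' _ _ (by cases image with | nil => exact absurd rfl hne | cons a l => simp; omega)]
  rw [PySem.List.slice_to_neg_one, List.dropLast_concat]
  congr 1
  congr 1
  apply List.map_congr_left
  intro bi hbi
  apply List.map_congr_left
  intro bj hbj
  rw [List.mem_range] at hbi hbj
  have hread : ∀ (t u : Nat), t < (image.length/4 + image.length%4)*4 →
      u < ((image.headD []).length/2 + (image.headD []).length%2)*2 →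
      pvRead ((List.range image.length).foldl
          (fun m i => m.set i ((List.range (image.headD []).length).foldl
            (fun r j => r.set j (pvRead image (i:Int) (j:Int))) (m.getD i [])))
          (List.replicate ((image.length/4 + image.length%4)*4)
            (List.replicate (((image.headD []).length/2 + (image.headD []).length%2)*2) 0)))
        (t:Int) (u:Int) = pvPad image t u := by
    intro t u ht hu
    rw [pvRead_nat, pvCopy_entry image _ _ _ _ ht hu, pvPad]
  have eb1 : ((4*bi : Nat) : Int) + 1 = ((4*bi+1 : Nat) : Int) := by push_cast; ring
  have eb2 : ((4*bi : Nat) : Int) + 2 = ((4*bi+2 : Nat) : Int) := by push_cast; ring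
  have eb3 : ((4*bi : Nat) : Int) + 3 = ((4*bi+3 : Nat) : Int) := by push_cast; ring
  have ec1 : ((2*bj : Nat) : Int) + 1 = ((2*bj+1 : Nat) : Int) := by push_cast; ring
  rw [eb1, eb2, eb3, ec1]
  rw [hread (4*bi) (2*bj) (by omega) (by omega), hread (4*bi+1) (2*bj) (by omega) (by omega),
      hread (4*bi+2) (2*bj) (by omega) (by omega), hread (4*bi+3) (2*bj) (by omega) (by omega),
      hread (4*bi) (2*bj+1) (by omega) (by omega), hread (4*bi+1) (2*bj+1) (by omega) (by omega),
      hread (4*bi+2) (2*bj+1) (by omega) (by omega), hread (4*bi+3) (2*bj+1) (by omega) (by omega)]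
  rw [pvBChar]

-- ===== B-side lemmas: scatter-accumulate characterization =====

-- per-pixel key and weighted value of B's scatter pass (Nat world)
def pvKey (Cn i j : Nat) : Nat := (i / 4) * Cn + j / 2
def pvVal (image : List (List Int)) (i j : Nat) : Int :=
  (image.getD i []).getD j 0 * ((1 : Int) <<< ((j % 2) * 4 + i % 4))

theorem pvScatter_len (key : Nat → Nat) (v : Nat → Int) (l : List Nat) :
    ∀ s : List Int,
    (l.foldl (fun s j => s.set (key j) (s.getD (key j) 0 + v j)) s).length = s.length := by
  induction l with
  | nil => intro s; rfl
  | cons a t ih => intro s; rw [List.foldl_cons, ih, List.length_set]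

theorem pvScatter_getD (key : Nat → Nat) (v : Nat → Int) (l : List Nat) :
    ∀ (s : List Int) (t : Nat), (∀ j ∈ l, key j < s.length) →
    (l.foldl (fun s j => s.set (key j) (s.getD (key j) 0 + v j)) s).getD t 0
      = s.getD t 0 + ((l.filter (fun j => key j == t)).map v).sum := by
  induction l with
  | nil => intro s t _; simp
  | cons a l ih =>
    intro s t h
    rw [List.foldl_cons, ih _ t (by
        intro j hj; rw [List.length_set]; exact h j (List.mem_cons_of_mem a hj))]
    rw [List.filter_cons]
    by_cases ha : key a = t
    · rw [if_pos (by simpa using ha), List.map_cons, List.sum_cons]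
      have : (s.set (key a) (s.getD (key a) 0 + v a)).getD t 0 = s.getD t 0 + v a := by
        subst ha
        rw [List.getD_eq_getElem?_getD, List.getElem?_set,
            if_pos rfl, if_pos (h a (by simp)), Option.getD_some]
      rw [this]; ring
    · rw [if_neg (by simpa using ha)]
      have : (s.set (key a) (s.getD (key a) 0 + v a)).getD t 0 = s.getD t 0 := by
        rw [List.getD_eq_getElem?_getD, List.getElem?_set, if_neg ha,
            ← List.getD_eq_getElem?_getD]
      rw [this]

theorem pvScatter2_getD (key : Nat → Nat → Nat) (v : Nat → Nat → Int) (cN : Nat) (l : List Nat) :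
    ∀ (s : List Int) (t : Nat), (∀ i ∈ l, ∀ j ∈ List.range cN, key i j < s.length) →
    (l.foldl (fun s i => (List.range cN).foldl
        (fun s j => s.set (key i j) (s.getD (key i j) 0 + v i j)) s) s).getD t 0
      = s.getD t 0
        + (l.map (fun i => (((List.range cN).filter (fun j => key i j == t)).map (v i)).sum)).sum := by
  induction l with
  | nil => intro s t _; simp
  | cons a l ih =>
    intro s t h
    rw [List.foldl_cons, ih _ t (by
        intro i hi j hj
        rw [pvScatter_len]
        exact h i (List.mem_cons_of_mem a hi) j hj)]
    rw [pvScatter_getD (key a) (v a) _ s t (fun j hj => h a (by simp) j hj)]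
    rw [List.map_cons, List.sum_cons]; ring

theorem pvScatter2_len (key : Nat → Nat → Nat) (v : Nat → Nat → Int) (cN : Nat) (l : List Nat) :
    ∀ s : List Int,
    (l.foldl (fun s i => (List.range cN).foldl
        (fun s j => s.set (key i j) (s.getD (key i j) 0 + v i j)) s) s).length = s.length := by
  induction l with
  | nil => intro s; rfl
  | cons a t ih => intro s; rw [List.foldl_cons, ih, pvScatter_len]

theorem pvGetD_replicate (n t : Nat) : (List.replicate n (0:Int)).getD t 0 = 0 := by
  rw [List.getD_eq_getElem?_getD, List.getElem?_replicate]
  split <;> rfl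

theorem pvKeyEq (Cn a r b q : Nat) (hr : r < Cn) (hq : q < Cn) :
    a * Cn + r = b * Cn + q ↔ a = b ∧ r = q := by
  constructor
  · intro h
    rcases Nat.lt_trichotomy a b with hab | hab | hab
    · exfalso
      have h2 : (a+1) * Cn ≤ b * Cn := Nat.mul_le_mul_right _ (by omega)
      have h3 : (a+1) * Cn = a * Cn + Cn := by ring
      omega
    · subst hab; exact ⟨rfl, by omega⟩
    · exfalso
      have h2 : (b+1) * Cn ≤ a * Cn := Nat.mul_le_mul_right _ (by omega)
      have h3 : (b+1) * Cn = b * Cn + Cn := by ring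
      omega
  · rintro ⟨rfl, rfl⟩; rfl

theorem pvSumDiv2 (g : Nat → Int) (b : Nat) : ∀ n : Nat,
    (((List.range n).filter (fun j => j / 2 == b)).map g).sum
      = (if 2*b < n then g (2*b) else 0) + (if 2*b+1 < n then g (2*b+1) else 0) := by
  intro n
  induction n with
  | zero => simp
  | succ n ih =>
    rw [List.range_succ, List.filter_append, List.map_append, List.sum_append, ih]
    have hsing : ((List.filter (fun j => j / 2 == b) [n]).map g).sum
        = if n / 2 = b then g n else 0 := by
      rw [List.filter_cons]
      split_ifs with h1 h2 h3
      · simp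
      · exact absurd (by simpa using h1) h2
      · exact absurd (by simpa using h3) h1
      · simp
    rw [hsing]
    have hiff : ∀ m : Nat, m ≠ n → (if m < n+1 then g m else 0) = (if m < n then g m else 0) := by
      intro m hm
      by_cases h : m < n
      · rw [if_pos (by omega), if_pos h]
      · rw [if_neg (by omega), if_neg h]
    by_cases hb0 : n = 2*b
    · subst hb0
      split_ifs <;> first | ring1 | (exfalso; omega)
    · by_cases hb1 : n = 2*b+1
      · subst hb1
        split_ifs <;> first | ring1 | (exfalso; omega)
      · rw [if_neg (show ¬ n / 2 = b by omega), add_zero,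
            hiff (2*b) (by omega), hiff (2*b+1) (by omega)]

set_option maxHeartbeats 1000000 in
theorem pvSumDiv4 (G : Nat → Int) (b : Nat) : ∀ n : Nat,
    ((List.range n).map (fun i => if i / 4 = b then G i else 0)).sum
      = (if 4*b < n then G (4*b) else 0) + (if 4*b+1 < n then G (4*b+1) else 0)
        + (if 4*b+2 < n then G (4*b+2) else 0) + (if 4*b+3 < n then G (4*b+3) else 0) := by
  intro n
  induction n with
  | zero => simp
  | succ n ih =>
    rw [List.range_succ, List.map_append, List.sum_append, ih]
    simp only [List.map_cons, List.map_nil, List.sum_cons, List.sum_nil, add_zero]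
    have hiff : ∀ m : Nat, m ≠ n → (if m < n+1 then G m else 0) = (if m < n then G m else 0) := by
      intro m hm
      by_cases h : m < n
      · rw [if_pos (by omega), if_pos h]
      · rw [if_neg (by omega), if_neg h]
    by_cases h0 : n = 4*b
    · subst h0
      split_ifs <;> first | ring1 | (exfalso; omega)
    · by_cases h1 : n = 4*b+1
      · subst h1
        split_ifs <;> first | ring1 | (exfalso; omega)
      · by_cases h2 : n = 4*b+2
        · subst h2
          split_ifs <;> first | ring1 | (exfalso; omega)
        · by_cases h3 : n = 4*b+3
          · subst h3
            split_ifs <;> first | ring1 | (exfalso; omega)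
          · rw [if_neg (show ¬ n / 4 = b by omega), add_zero,
                hiff (4*b) (by omega), hiff (4*b+1) (by omega),
                hiff (4*b+2) (by omega), hiff (4*b+3) (by omega)]

-- the value B's accumulator holds for block (bi, bj) is exactly A's 8-pixel code
theorem pvCodes_entry (image : List (List Int)) (bi bj : Nat)
    (hbi : bi < image.length/4 + image.length%4)
    (hbj : bj < (image.headD []).length/2 + (image.headD []).length%2) :
    ((List.range image.length).foldl (fun s i => (List.range (image.headD []).length).foldl
        (fun s j => s.set (pvKey ((image.headD []).length/2 + (image.headD []).length%2) i j)
          (s.getD (pvKey ((image.headD []).length/2 + (image.headD []).length%2) i j) 0 + pvVal image i j)) s)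
        (List.replicate ((image.length/4 + image.length%4) * ((image.headD []).length/2 + (image.headD []).length%2)) 0)).getD
      (bi * ((image.headD []).length/2 + (image.headD []).length%2) + bj) 0
      = pvPad image (4*bi) (2*bj) * 1 + pvPad image (4*bi+1) (2*bj) * 2
        + pvPad image (4*bi+2) (2*bj) * 4 + pvPad image (4*bi+3) (2*bj) * 8
        + pvPad image (4*bi) (2*bj+1) * 16 + pvPad image (4*bi+1) (2*bj+1) * 32
        + pvPad image (4*bi+2) (2*bj+1) * 64 + pvPad image (4*bi+3) (2*bj+1) * 128 := by
  set rN := image.length with hrN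
  set cN := (image.headD []).length with hcN
  set Rn := rN/4 + rN%4 with hRn
  set Cn := cN/2 + cN%2 with hCn
  rw [pvScatter2_getD (pvKey Cn) (pvVal image) cN (List.range rN)
      (List.replicate (Rn * Cn) 0) (bi * Cn + bj) (by
        intro i hi j hj
        rw [List.length_replicate]
        rw [List.mem_range] at hi hj
        have h1 : i / 4 < Rn := by omega
        have h2 : j / 2 < Cn := by omega
        calc pvKey Cn i j < (i/4) * Cn + Cn := by unfold pvKey; omega
          _ = (i/4 + 1) * Cn := by ring
          _ ≤ Rn * Cn := Nat.mul_le_mul_right _ (by omega))]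
  rw [pvGetD_replicate, zero_add]
  have hmap : (List.range rN).map
      (fun i => (((List.range cN).filter (fun j => pvKey Cn i j == bi * Cn + bj)).map (pvVal image i)).sum)
      = (List.range rN).map (fun i => if i / 4 = bi then
          ((if 2*bj < cN then pvVal image i (2*bj) else 0)
            + (if 2*bj+1 < cN then pvVal image i (2*bj+1) else 0)) else 0) := by
    apply List.map_congr_left
    intro i _
    have hfc : (List.range cN).filter (fun j => pvKey Cn i j == bi * Cn + bj)
        = (List.range cN).filter (fun j => (i / 4 == bi) && (j / 2 == bj)) := by
      apply List.filter_congr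
      intro j hj
      rw [List.mem_range] at hj
      have h2 : j / 2 < Cn := by omega
      rw [Bool.eq_iff_iff]
      simp only [beq_iff_eq, Bool.and_eq_true]
      exact pvKeyEq Cn (i/4) (j/2) bi bj h2 (by omega)
    rw [hfc]
    by_cases hib : i / 4 = bi
    · rw [if_pos hib]
      have : (List.range cN).filter (fun j => (i / 4 == bi) && (j / 2 == bj))
          = (List.range cN).filter (fun j => j / 2 == bj) := by
        apply List.filter_congr
        intro j _
        simp [hib]
      rw [this, pvSumDiv2]
    · rw [if_neg hib]
      have : (List.range cN).filter (fun j => (i / 4 == bi) && (j / 2 == bj)) = [] := by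
        apply List.filter_eq_nil_iff.mpr
        intro j _
        simp [hib]
      rw [this]; rfl
  rw [hmap, pvSumDiv4]
  have hval : ∀ k c : Nat, k < 4 → c < 2 →
      (if 4*bi + k < rN then (if 2*bj + c < cN then pvVal image (4*bi+k) (2*bj+c) else 0) else 0)
        = pvPad image (4*bi+k) (2*bj+c) * ((1:Int) <<< (c*4 + k)) := by
    intro k c hk hc
    have hmod4 : (4*bi + k) % 4 = k := by omega
    have hmod2 : (2*bj + c) % 2 = c := by omega
    unfold pvVal pvPad
    rw [hmod4, hmod2]
    split_ifs <;> first | ring1 | (exfalso; omega)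
  have e0 := hval 0 0 (by omega) (by omega)
  have e1 := hval 1 0 (by omega) (by omega)
  have e2 := hval 2 0 (by omega) (by omega)
  have e3 := hval 3 0 (by omega) (by omega)
  have e4 := hval 0 1 (by omega) (by omega)
  have e5 := hval 1 1 (by omega) (by omega)
  have e6 := hval 2 1 (by omega) (by omega)
  have e7 := hval 3 1 (by omega) (by omega)
  simp only [Nat.add_zero, Nat.mul_zero, Nat.zero_mul, Nat.zero_add] at e0 e1 e2 e3 e4 e5 e6 e7 ⊢
  have hsplit : ∀ i : Nat, (if i < rN then
        (if 2*bj < cN then pvVal image i (2*bj) else 0) + (if 2*bj+1 < cN then pvVal image i (2*bj+1) else 0)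
      else 0)
      = (if i < rN then (if 2*bj < cN then pvVal image i (2*bj) else 0) else 0)
        + (if i < rN then (if 2*bj+1 < cN then pvVal image i (2*bj+1) else 0) else 0) := by
    intro i; split_ifs <;> ring
  rw [hsplit (4*bi), hsplit (4*bi+1), hsplit (4*bi+2), hsplit (4*bi+3)]
  rw [e0, e1, e2, e3, e4, e5, e6, e7]
  have s1 : (1:Int) <<< (1:Nat) = 2 := by decide
  have s2 : (1:Int) <<< (2:Nat) = 4 := by decide
  have s3 : (1:Int) <<< (3:Nat) = 8 := by decide
  have s4 : (1:Int) <<< (4:Nat) = 16 := by decide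
  have s5 : (1:Int) <<< (5:Nat) = 32 := by decide
  have s6 : (1:Int) <<< (6:Nat) = 64 := by decide
  have s7 : (1:Int) <<< (7:Nat) = 128 := by decide
  norm_num [s1, s2, s3, s4, s5, s6, s7]
  ring

theorem pvBraille_eq (c : Int) : pvBraille c = num2tenjicode c := by
  simp only [pvBraille, num2tenjicode, zero_add]

-- the row of B's accumulator for block row bi, read off entry by entry
theorem pvCodes_row (image : List (List Int)) (bi : Nat)
    (hbi : bi < image.length/4 + image.length%4) :
    ((((List.range image.length).foldl (fun s i => (List.range (image.headD []).length).foldl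
        (fun s j => s.set (pvKey ((image.headD []).length/2 + (image.headD []).length%2) i j)
          (s.getD (pvKey ((image.headD []).length/2 + (image.headD []).length%2) i j) 0 + pvVal image i j)) s)
        (List.replicate ((image.length/4 + image.length%4) * ((image.headD []).length/2 + (image.headD []).length%2)) 0)).drop
          (bi * ((image.headD []).length/2 + (image.headD []).length%2))).take
          ((image.headD []).length/2 + (image.headD []).length%2))
      = (List.range ((image.headD []).length/2 + (image.headD []).length%2)).map (fun bj =>
          pvPad image (4*bi) (2*bj) * 1 + pvPad image (4*bi+1) (2*bj) * 2
            + pvPad image (4*bi+2) (2*bj) * 4 + pvPad image (4*bi+3) (2*bj) * 8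
            + pvPad image (4*bi) (2*bj+1) * 16 + pvPad image (4*bi+1) (2*bj+1) * 32
            + pvPad image (4*bi+2) (2*bj+1) * 64 + pvPad image (4*bi+3) (2*bj+1) * 128) := by
  set rN := image.length with hrN
  set cN := (image.headD []).length with hcN
  set Rn := rN/4 + rN%4 with hRn
  set Cn := cN/2 + cN%2 with hCn
  set F := fun (s : List Int) (i : Nat) => (List.range cN).foldl
      (fun s j => s.set (pvKey Cn i j) (s.getD (pvKey Cn i j) 0 + pvVal image i j)) s with hF
  have hlen : ((List.range rN).foldl F (List.replicate (Rn * Cn) 0)).length = Rn * Cn := by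
    rw [hF, pvScatter2_len, List.length_replicate]
  have hle : bi * Cn + Cn ≤ Rn * Cn := by
    have h1 : (bi + 1) * Cn ≤ Rn * Cn := Nat.mul_le_mul_right Cn (by omega)
    have h2 : (bi + 1) * Cn = bi * Cn + Cn := by ring
    omega
  apply List.ext_getElem
  · simp only [List.length_take, List.length_drop, hlen, List.length_map, List.length_range]
    omega
  · intro n h1 h2
    rw [List.getElem_take, List.getElem_drop]
    rw [List.getElem_map, List.getElem_range]
    rw [← List.getD_eq_getElem _ 0 (by rw [hlen]; simp only [List.length_take, List.length_drop, hlen, List.length_range] at h1 ⊢; omega)]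
    have hn : n < Cn := by simp only [List.length_take, List.length_drop, hlen] at h1; omega
    exact pvCodes_entry image bi n hbi hn

set_option maxHeartbeats 1000000 in
theorem pvB_eval (image : List (List Int)) (hne : image ≠ []) :
    image2tenji_alt image = String.ofList (List.intercalate ['\n']
      ((List.range (image.length/4 + image.length%4)).map (fun bi =>
        (List.range ((image.headD []).length/2 + (image.headD []).length%2)).map
          (pvBChar image bi)))) := by
  set rN := image.length with hrN
  set cN := (image.headD []).length with hcN
  have hnr := pvFloordivMod4 rN
  have hnc := pvFloordivMod2 cN
  simp only [image2tenji_alt, pvGet0 image hne, ← hrN, ← hcN]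
  rw [hnr, hnc]
  set Rn := rN/4 + rN%4 with hRn
  set Cn := cN/2 + cN%2 with hCn
  have hmul : (((Rn : Nat) : Int) * ((Cn : Nat) : Int)).toNat = Rn * Cn := by
    rw [← Nat.cast_mul, Int.toNat_natCast]
  rw [hmul]
  simp only [PySem.List.pyRange_one, sub_zero, Int.toNat_natCast, zero_add, List.foldl_map,
    List.map_map]
  -- index-arithmetic bridges from Python Int ops to Nat ops
  have hd4 : ∀ m : Nat, PySem.Int.floordiv (m:Int) 4 = ((m/4 : Nat):Int) := fun m => by
    exact_mod_cast PySem.Int.floordiv_natCast m 4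
  have hd2 : ∀ m : Nat, PySem.Int.floordiv (m:Int) 2 = ((m/2 : Nat):Int) := fun m => by
    exact_mod_cast PySem.Int.floordiv_natCast m 2
  have hm4 : ∀ m : Nat, PySem.Int.mod (m:Int) 4 = ((m%4 : Nat):Int) := fun m => by
    exact_mod_cast PySem.Int.mod_natCast m 4
  have hm2 : ∀ m : Nat, PySem.Int.mod (m:Int) 2 = ((m%2 : Nat):Int) := fun m => by
    exact_mod_cast PySem.Int.mod_natCast m 2
  have hg : ∀ (s : List Int) (n : Nat), (PySem.List.pyGet? s (n:Int)).getD 0 = s.getD n 0 := by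
    intro s n; simp [PySem.List.pyGet?_natCast, List.getD_eq_getElem?_getD]
  -- the scatter pass, rewritten into its Nat form
  have hfold : (List.range rN).foldl (fun (s : List Int) (i : Nat) => (List.range cN).foldl (fun (s : List Int) (j : Nat) =>
        PySem.List.pySetD s (PySem.Int.floordiv (i:Int) 4 * ((Cn:Nat):Int) + PySem.Int.floordiv (j:Int) 2)
          ((PySem.List.pyGet? s (PySem.Int.floordiv (i:Int) 4 * ((Cn:Nat):Int) + PySem.Int.floordiv (j:Int) 2)).getD 0
            + pvRead image (i:Int) (j:Int) * ((1:Int) <<< (PySem.Int.mod (j:Int) 2 * 4 + PySem.Int.mod (i:Int) 4).toNat))) s)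
        (List.replicate (Rn * Cn) 0)
      = (List.range rN).foldl (fun s i => (List.range cN).foldl (fun s j =>
          s.set (pvKey Cn i j) (s.getD (pvKey Cn i j) 0 + pvVal image i j)) s)
        (List.replicate (Rn * Cn) 0) := by
    apply PySem.List.foldl_congr_mem
    intro s i _
    apply PySem.List.foldl_congr_mem
    intro s j _
    have hT : PySem.Int.floordiv (i:Int) 4 * ((Cn:Nat):Int) + PySem.Int.floordiv (j:Int) 2
        = ((pvKey Cn i j : Nat) : Int) := by
      rw [hd4 i, hd2 j]; unfold pvKey; push_cast; ring
    have hM : (PySem.Int.mod (j:Int) 2 * 4 + PySem.Int.mod (i:Int) 4).toNat = (j%2)*4 + i%4 := by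
      rw [hm2 j, hm4 i,
          show (((j%2 : Nat):Int) * 4 + ((i%4 : Nat):Int)) = (((j%2)*4 + i%4 : Nat) : Int) from by
            push_cast; ring,
          Int.toNat_natCast]
    rw [hT, PySem.List.pySetD_natCast, hg, pvRead_nat, hM, pvVal]
  rw [hfold]
  congr 1
  congr 1
  apply List.map_congr_left
  intro bi hbi
  rw [List.mem_range] at hbi
  simp only [Function.comp_apply]
  have hc1 : ((bi:Int) * ((Cn:Nat):Int)) = ((bi*Cn : Nat):Int) := by push_cast; ring
  have hc2 : (((bi:Int) + 1) * ((Cn:Nat):Int)) = ((bi*Cn : Nat):Int) + ((Cn:Nat):Int) := by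
    push_cast; ring
  rw [hc1, hc2, PySem.List.slice_natCast_add]
  rw [pvCodes_row image bi hbi]
  rw [List.map_map]
  apply List.map_congr_left
  intro bj _
  show pvBraille _ = _
  rw [pvBraille_eq]
  rfl

theorem image2tenji_eq_alt (image : List (List Int)) (hne : image ≠ []) :
    image2tenji image = image2tenji_alt image := by
  rw [pvA_eval image hne, pvB_eval image hne]

-- ===== VERDICT (by name: the statement is the Claim_ definition above) =====
theorem image2tenji_spec : Claim_equal_image2tenji := by
  intro image _ hpre
  unfold Spec_image2tenji
  exact image2tenji_eq_alt image hpre.1
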